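-- pv_equiv track=rewrite | github.com/shruum/lmms-eval | my_analysis/vlms_are_biased_attention_analysis.py | compare_prediction
-- ===== SOURCE A (Python) =====
-- from typing import Any, Dict, List, Optional, Tuple
--
-- def compare_prediction(pred_raw: str, gt: str, expected_bias: str) -> Tuple[bool, bool, str]:
--     pred_norm = pred_raw.lower().strip("{}").strip()
--     gt_norm = gt.lower().strip("{}").strip()
--     bias_norm = expected_bias.lower().strip("{}").strip()
--
--     is_correct = pred_norm == gt_norm
--     matches_bias = pred_norm == bias_norm
--
--     if not is_correct or not matches_bias:
--         pred_nums = "".join(c for c in pred_norm if c.isdigit())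
--         gt_nums = "".join(c for c in gt_norm if c.isdigit())
--         bias_nums = "".join(c for c in bias_norm if c.isdigit())
--         if not is_correct and pred_nums and gt_nums:
--             is_correct = pred_nums == gt_nums
--         if not matches_bias and pred_nums and bias_nums:
--             matches_bias = pred_nums == bias_nums
--
--     return is_correct, matches_bias, pred_norm
-- ===== SOURCE B (Python) =====
-- def compare_prediction(pred_raw: str, gt: str, expected_bias: str):
--     # Canonical key: digit-substring if nonempty, else the normalized string itself.
--     # Two strings match under A's rule iff their keys are equal.
--     def key(s):
--         n = s.lower().strip("{}").strip()
--         d = "".join(c for c in n if c.isdigit())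
--         return (d or n), n
--
--     pk, pred_norm = key(pred_raw)
--     gk, _ = key(gt)
--     bk, _ = key(expected_bias)
--     return pk == gk, pk == bk, pred_norm
-- ===== Notes on version B (the rewrite author's own statement) =====
-- stated objective: alternative
-- what changed: Replaces A's stateful conditional digit-fallback block with a canonical key per input (its digit substring if nonempty, else the normalized string) compared by plain equality; correct since a nonempty digit string never equals a digit-free string and digit extraction is idempotent.
import Mathlib
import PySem

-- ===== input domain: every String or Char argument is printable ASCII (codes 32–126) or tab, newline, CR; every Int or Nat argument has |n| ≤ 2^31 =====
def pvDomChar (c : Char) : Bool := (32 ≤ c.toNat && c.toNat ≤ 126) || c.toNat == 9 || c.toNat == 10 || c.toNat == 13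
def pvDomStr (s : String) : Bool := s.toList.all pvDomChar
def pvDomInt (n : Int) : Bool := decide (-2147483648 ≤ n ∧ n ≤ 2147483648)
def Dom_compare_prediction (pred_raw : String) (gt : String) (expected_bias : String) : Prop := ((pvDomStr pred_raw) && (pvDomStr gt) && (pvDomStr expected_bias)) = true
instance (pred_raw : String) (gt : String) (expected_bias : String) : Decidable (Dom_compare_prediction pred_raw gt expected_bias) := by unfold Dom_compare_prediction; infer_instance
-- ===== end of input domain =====

-- B replaces A's conditional digit-fallback block with one canonical key per input
-- (digit substring if nonempty, else the normalized string) compared by plain equality.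
-- ===== PORT A =====
-- s.lower().strip("{}").strip()
def pvNormA (s : String) : String :=
  PySem.Str.strip (PySem.Str.stripChars (PySem.Str.lower s) "{}")

-- "".join(c for c in s if c.isdigit())
def pvDigitsA (s : String) : String :=
  String.ofList (s.toList.filter (fun c => PySem.Chars.isdigit c))

def compare_prediction (pred_raw : String) (gt : String) (expected_bias : String) : Bool × Bool × String :=
  let pred_norm := pvNormA pred_raw
  let gt_norm := pvNormA gt
  let bias_norm := pvNormA expected_bias
  let is_correct := pred_norm == gt_norm
  let matches_bias := pred_norm == bias_norm
  if !is_correct || !matches_bias then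
    let pred_nums := pvDigitsA pred_norm
    let gt_nums := pvDigitsA gt_norm
    let bias_nums := pvDigitsA bias_norm
    let is_correct := if !is_correct && !(pred_nums == "") && !(gt_nums == "") then pred_nums == gt_nums else is_correct
    let matches_bias := if !matches_bias && !(pred_nums == "") && !(bias_nums == "") then pred_nums == bias_nums else matches_bias
    (is_correct, matches_bias, pred_norm)
  else
    (is_correct, matches_bias, pred_norm)

-- ===== PORT B =====
def pvDigitsB (s : String) : String :=
  String.ofList (s.toList.filter (fun c => PySem.Chars.isdigit c))

-- key(s): norm = s.lower().strip("{}").strip(); d = digits(norm); return (d or norm), norm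
def pvKeyB (s : String) : String × String :=
  let n := PySem.Str.strip (PySem.Str.stripChars (PySem.Str.lower s) "{}")
  let d := pvDigitsB n
  (if d == "" then n else d, n)

def compare_prediction_alt (pred_raw : String) (gt : String) (expected_bias : String) : Bool × Bool × String :=
  let (pk, pred_norm) := pvKeyB pred_raw
  let (gk, _) := pvKeyB gt
  let (bk, _) := pvKeyB expected_bias
  (pk == gk, pk == bk, pred_norm)

-- ===== PRECONDITION & SPEC =====
def Spec_compare_prediction (pred_raw : String) (gt : String) (expected_bias : String) (out : Bool × Bool × String) : Prop := out = compare_prediction_alt pred_raw gt expected_bias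
instance (pred_raw : String) (gt : String) (expected_bias : String) (out : Bool × Bool × String) : Decidable (Spec_compare_prediction pred_raw gt expected_bias out) := by unfold Spec_compare_prediction; infer_instance

-- ===== CLAIM (what is proved, stated in full; the proofs are below) =====
def Claim_equal_compare_prediction : Prop := ∀ (pred_raw : String) (gt : String) (expected_bias : String), Dom_compare_prediction pred_raw gt expected_bias → Spec_compare_prediction pred_raw gt expected_bias (compare_prediction pred_raw gt expected_bias)

-- ===== LEMMAS AND PROOFS =====

-- digit extraction is idempotent
lemma pvDigits_idem (s : String) : pvDigitsB (pvDigitsB s) = pvDigitsB s := by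
  unfold pvDigitsB
  congr 1
  rw [String.toList_ofList, List.filter_filter]
  simp

-- existence of a digit, as decide of ∃ vs negated decide of ∀
lemma pv_dec_ex (l : List Char) :
    (decide (∃ x ∈ l, PySem.Chars.isdigit x = true)) =
    !decide (∀ a ∈ l, PySem.Chars.isdigit a = false) := by
  rw [← decide_not, decide_eq_decide]
  push_neg
  simp [Bool.ne_false_iff]

-- the key of B equals A's fallback comparison result
lemma key_match (p g : String) :
    ((if pvDigitsB p == "" then p else pvDigitsB p) ==
     (if pvDigitsB g == "" then g else pvDigitsB g)) =
    (if p == g then true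
     else (!(pvDigitsB p == "") && !(pvDigitsB g == "")) && pvDigitsB p == pvDigitsB g) := by
  by_cases hpg : p = g
  · subst hpg; simp
  · have hne : (p == g) = false := beq_eq_false_iff_ne.mpr hpg
    by_cases hp : pvDigitsB p = "" <;> by_cases hg : pvDigitsB g = ""
    · simp [hp, hg, hne]
    · -- p has no digits, g's digits nonempty: p ≠ digits g
      have hne2 : p ≠ pvDigitsB g := by
        intro h
        apply hg
        rw [← pvDigits_idem g, ← h]
        exact hp
      simp [hp, hg, hpg, beq_eq_false_iff_ne.mpr hne2]
    · have hne2 : pvDigitsB p ≠ g := by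
        intro h
        apply hp
        rw [← pvDigits_idem p, h]
        exact hg
      simp [hp, hg, hpg, beq_eq_false_iff_ne.mpr hne2]
    · simp [hp, hg, hpg]

-- ===== VERDICT (by name: the statement is the Claim_ definition above) =====
theorem compare_prediction_spec : Claim_equal_compare_prediction := by
  intro pred_raw gt expected_bias _
  unfold Spec_compare_prediction compare_prediction compare_prediction_alt pvKeyB
  simp only [pvNormA, pvDigitsA]
  generalize PySem.Str.strip (PySem.Str.stripChars (PySem.Str.lower pred_raw) "{}") = p
  generalize PySem.Str.strip (PySem.Str.stripChars (PySem.Str.lower gt) "{}") = g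
  generalize PySem.Str.strip (PySem.Str.stripChars (PySem.Str.lower expected_bias) "{}") = b
  show _ = ((if pvDigitsB p == "" then p else pvDigitsB p) == (if pvDigitsB g == "" then g else pvDigitsB g),
            (if pvDigitsB p == "" then p else pvDigitsB p) == (if pvDigitsB b == "" then b else pvDigitsB b), p)
  rw [key_match p g, key_match p b]
  simp only [pvDigitsB]
  by_cases h1 : (p == g) = true <;> by_cases h2 : (p == b) = true <;> simp [h1, h2, beq_eq_decide, pv_dec_ex]
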